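-- pv_equiv track=rewrite | github.com/KarthusChen/Python-Learning | Course/Projects/Project 3.py | is_valid_RN
-- ===== SOURCE A (Python) =====
-- def is_valid_RN(number):
--     if len(number) != 9 or not number.isdigit():
--         return False
--
--     def aba_algorithm(n):
--         sum_thirds = sum(int(n[i]) for i in range(len(n)-1, -1, -3))
--         sum_thirds_2 = sum(int(n[i]) for i in range(len(n)-2, -1, -3)) * 7
--         sum_thirds_3 = sum(int(n[i]) for i in range(len(n)-3, -1, -3)) * 3
--         total = sum_thirds + sum_thirds_2 + sum_thirds_3
--         return total % 10 == 0
--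
--     return aba_algorithm(number)
-- ===== SOURCE B (Python) =====
-- def is_valid_RN(number):
--     if len(number) != 9 or not number.isdigit():
--         return False
--     weights = [3, 7, 1, 3, 7, 1, 3, 7, 1]
--     total = sum(int(d) * w for d, w in zip(number, weights))
--     return total % 10 == 0
-- ===== Notes on version B (the rewrite author's own statement) =====
-- stated objective: idiomatic
-- what changed: Replaces A's three reversed strided scans (range(len-1,-1,-3) etc., each summed then scaled) with a single left-to-right pass zipping the digits against the fixed ABA weight table [3,7,1,3,7,1,3,7,1].
import Mathlib
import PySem

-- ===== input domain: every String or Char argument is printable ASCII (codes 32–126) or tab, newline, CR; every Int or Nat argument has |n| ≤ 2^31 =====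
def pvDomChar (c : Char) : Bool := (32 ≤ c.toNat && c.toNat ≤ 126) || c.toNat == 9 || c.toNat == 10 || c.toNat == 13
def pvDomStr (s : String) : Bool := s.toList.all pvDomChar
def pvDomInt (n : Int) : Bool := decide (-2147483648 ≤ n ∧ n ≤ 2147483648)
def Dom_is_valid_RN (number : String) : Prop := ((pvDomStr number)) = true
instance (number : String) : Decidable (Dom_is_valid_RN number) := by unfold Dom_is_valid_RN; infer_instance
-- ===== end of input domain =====

-- B replaces A's three reversed strided digit scans with one left-to-right pass over a fixed ABA weight table [3,7,1,...] (idiomatic single pass; same result).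


-- ===== PORT A =====
-- transliteration of A: guard, then three strided sums over range(len-1,-1,-3) / (len-2,…) / (len-3,…)
def is_valid_RN (number : String) : Bool :=
  if PySem.Str.len number ≠ 9 || !(PySem.Str.strIsdigit number) then false
  else
    let n := number.toList
    let dig : Int → Int := fun i => (PySem.Int.ofChars? [PySem.List.pyGetD n i ' ']).getD 0
    let sum_thirds := ((PySem.List.pyRange ((n.length : Int) - 1) (-1) (-3)).map dig).sum
    let sum_thirds_2 := ((PySem.List.pyRange ((n.length : Int) - 2) (-1) (-3)).map dig).sum * 7
    let sum_thirds_3 := ((PySem.List.pyRange ((n.length : Int) - 3) (-1) (-3)).map dig).sum * 3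
    (sum_thirds + sum_thirds_2 + sum_thirds_3) % 10 == 0

-- ===== PORT B =====
-- transliteration of B: same guard, then one pass zipping digits with the ABA weight table
def is_valid_RN_alt (number : String) : Bool :=
  if PySem.Str.len number ≠ 9 || !(PySem.Str.strIsdigit number) then false
  else
    let weights : List Int := [3, 7, 1, 3, 7, 1, 3, 7, 1]
    let total := ((number.toList.zip weights).map
      (fun p => ((PySem.Int.ofChars? [p.1]).getD 0) * p.2)).sum
    total % 10 == 0

-- ===== PRECONDITION & SPEC =====
def Spec_is_valid_RN (number : String) (out : Bool) : Prop := out = is_valid_RN_alt number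
instance (number : String) (out : Bool) : Decidable (Spec_is_valid_RN number out) := by unfold Spec_is_valid_RN; infer_instance

-- ===== CLAIM (what is proved, stated in full; the proofs are below) =====
def Claim_equal_is_valid_RN : Prop := ∀ (number : String), Dom_is_valid_RN number → Spec_is_valid_RN number (is_valid_RN number)

-- ===== LEMMAS AND PROOFS =====

-- ===== VERDICT (by name: the statement is the Claim_ definition above) =====
theorem nine_eq (cs : List Char) (h : cs.length = 9) :
    ∃ a b c d e f g h i : Char, cs = [a,b,c,d,e,f,g,h,i] := by
  match cs, h with
  | [a,b,c,d,e,f,g,h,i], _ => exact ⟨a,b,c,d,e,f,g,h,i, rfl⟩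

theorem is_valid_RN_spec : Claim_equal_is_valid_RN := by
  intro number _
  unfold Spec_is_valid_RN is_valid_RN is_valid_RN_alt
  split
  · rfl
  · rename_i hg
    simp only [Bool.or_eq_true, decide_eq_true_eq, not_or, Bool.not_eq_eq_eq_not, Bool.not_true, not_not] at hg
    have hlen : number.toList.length = 9 := by
      have h1 := hg.1
      simp only [PySem.Str.len] at h1
      omega
    obtain ⟨a,b,c,d,e,f,g,h,i,hcs⟩ := nine_eq number.toList hlen
    rw [hcs]
    simp only [List.length_cons, List.length_nil]
    have hr1 : PySem.List.pyRange 8 (-1) (-3) = [8, 5, 2] := by decide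
    have hr2 : PySem.List.pyRange 7 (-1) (-3) = [7, 4, 1] := by decide
    have hr3 : PySem.List.pyRange 6 (-1) (-3) = [6, 3, 0] := by decide
    norm_num [hr1, hr2, hr3, List.zip, List.zipWith,
      PySem.List.pyGetD, PySem.List.pyGet?, PySem.List.pyIdx?, List.getElem?_cons_zero, List.getElem?_cons_succ,
      show ((8:Int).toNat = 8) from rfl, show ((7:Int).toNat = 7) from rfl,
      show ((6:Int).toNat = 6) from rfl, show ((5:Int).toNat = 5) from rfl,
      show ((4:Int).toNat = 4) from rfl, show ((3:Int).toNat = 3) from rfl,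
      show ((2:Int).toNat = 2) from rfl]
    generalize (PySem.Int.ofChars? [a]).getD 0 = va
    generalize (PySem.Int.ofChars? [b]).getD 0 = vb
    generalize (PySem.Int.ofChars? [c]).getD 0 = vc
    generalize (PySem.Int.ofChars? [d]).getD 0 = vd
    generalize (PySem.Int.ofChars? [e]).getD 0 = ve
    generalize (PySem.Int.ofChars? [f]).getD 0 = vf
    generalize (PySem.Int.ofChars? [g]).getD 0 = vg
    generalize (PySem.Int.ofChars? [h]).getD 0 = vh
    generalize (PySem.Int.ofChars? [i]).getD 0 = vi
    constructor <;> intro hd <;> omega
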